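-- pv_equiv track=rewrite | github.com/brunchmate/-AlgorithmStudy | guts27/Summer_Winter Coding(~2018)/방문길이.py | solution
-- ===== SOURCE A (Python) =====
-- def solution(dirs):
--     x,y = 0,0
--     answer = 0
--     road = []
--     for dir in dirs:
--         if dir == "U" and y+1 <= 5:
--             nx, ny = x,y+1
--         elif dir == "D" and y-1 >= -5:
--             nx, ny = x,y-1
--         elif dir == "R" and x+1 <=5:
--             nx, ny = x+1,y
--         elif dir == "L" and x-1 >=-5:
--             nx, ny = x-1,y
--         else:
--             continue
--
--         if (x,y,nx, ny) not in road:
--             road.append((x,y,nx, ny))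
--             road.append((nx, ny,x,y))
--             answer += 1
--         x= nx
--         y = ny
--     return answer
--     return answer
-- ===== SOURCE B (Python) =====
-- def solution(dirs):
--     moves = {"U": (0, 1), "D": (0, -1), "R": (1, 0), "L": (-1, 0)}
--     # stage 1: build the trajectory of in-bounds positions
--     path = [(0, 0)]
--     for d in dirs:
--         if d in moves:
--             dx, dy = moves[d]
--             x, y = path[-1]
--             nx, ny = x + dx, y + dy
--             if -5 <= nx <= 5 and -5 <= ny <= 5:
--                 path.append((nx, ny))
--     # stage 2: count distinct undirected edges between consecutive positions
--     return len({(min(p, q), max(p, q)) for p, q in zip(path, path[1:])})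
-- ===== Notes on version B (the rewrite author's own statement) =====
-- stated objective: simpler
-- what changed: Two staged passes replace A's single loop: a move-table-driven pass builds the trajectory of positions, then the answer is the count of distinct canonical undirected edges between consecutive positions (set comprehension over zip(path, path[1:])); A's seen-edge list, membership branch and counter are gone.
import Mathlib
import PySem

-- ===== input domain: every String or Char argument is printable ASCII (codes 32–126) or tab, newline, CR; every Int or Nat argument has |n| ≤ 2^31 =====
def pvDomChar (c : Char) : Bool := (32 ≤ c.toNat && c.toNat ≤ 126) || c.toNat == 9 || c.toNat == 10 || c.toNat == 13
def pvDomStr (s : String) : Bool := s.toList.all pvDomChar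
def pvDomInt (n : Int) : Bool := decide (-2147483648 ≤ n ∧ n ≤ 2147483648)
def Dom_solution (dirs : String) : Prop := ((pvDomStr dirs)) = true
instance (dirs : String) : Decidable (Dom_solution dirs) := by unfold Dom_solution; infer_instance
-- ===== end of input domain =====

-- B is a staged decomposition (objective: simpler): build the trajectory first
-- via a move table, then count the distinct canonical undirected edges of
-- consecutive positions; A's seen-list, counter and branch chain disappear.

-- ===== PORT A =====
-- state: (x, y, answer, road); road holds both directed tuples per segment
def stepA (st : Int × Int × Int × List (Int × Int × Int × Int)) (c : Char) :
    Int × Int × Int × List (Int × Int × Int × Int) :=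
  match st with
  | (x, y, answer, road) =>
    let mv : Option (Int × Int) :=
      if c = 'U' ∧ y + 1 ≤ 5 then some (x, y + 1)
      else if c = 'D' ∧ y - 1 ≥ -5 then some (x, y - 1)
      else if c = 'R' ∧ x + 1 ≤ 5 then some (x + 1, y)
      else if c = 'L' ∧ x - 1 ≥ -5 then some (x - 1, y)
      else none  -- 'continue'
    match mv with
    | none => (x, y, answer, road)
    | some (nx, ny) =>
      if (x, y, nx, ny) ∈ road then (nx, ny, answer, road)
      else (nx, ny, answer + 1, road ++ [(x, y, nx, ny), (nx, ny, x, y)])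

def solution (dirs : String) : Int :=
  (dirs.toList.foldl stepA (0, 0, 0, ([] : List (Int × Int × Int × Int)))).2.2.1

-- ===== PORT B =====
-- the moves table: moves.get(d) — none when d is not a key ('if d in moves')
def moveDelta (c : Char) : Option (Int × Int) :=
  if c = 'U' then some (0, 1)
  else if c = 'D' then some (0, -1)
  else if c = 'R' then some (1, 0)
  else if c = 'L' then some (-1, 0)
  else none

-- stage 1 body: path[-1] read with getD (path is nonempty by construction)
def stepPath (path : List (Int × Int)) (c : Char) : List (Int × Int) :=
  match moveDelta c with
  | none => path
  | some (dx, dy) =>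
    let p := path.getLast?.getD (0, 0)
    let nx := p.1 + dx
    let ny := p.2 + dy
    if -5 ≤ nx ∧ nx ≤ 5 ∧ -5 ≤ ny ∧ ny ≤ 5 then path ++ [(nx, ny)] else path

-- Python (min(p,q), max(p,q)) on pairs: lexicographic order
def canonB (p q : Int × Int) : (Int × Int) × (Int × Int) :=
  if p.1 < q.1 ∨ (p.1 = q.1 ∧ p.2 ≤ q.2) then (p, q) else (q, p)

def solution_alt (dirs : String) : Int :=
  let path := dirs.toList.foldl stepPath [(0, 0)]
  ((PySem.Set.ofList ((path.zip (path.drop 1)).map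
      (fun pq => canonB pq.1 pq.2))).length : Int)

-- ===== PRECONDITION & SPEC =====
def Spec_solution (dirs : String) (out : Int) : Prop := out = solution_alt dirs
instance (dirs : String) (out : Int) : Decidable (Spec_solution dirs out) := by unfold Spec_solution; infer_instance

-- ===== CLAIM (what is proved, stated in full; the proofs are below) =====
def Claim_equal_solution : Prop := ∀ (dirs : String), Dom_solution dirs → Spec_solution dirs (solution dirs)

-- ===== LEMMAS AND PROOFS =====

def edgesOf (p : List (Int × Int)) : List ((Int × Int) × (Int × Int)) :=
  (p.zip (p.drop 1)).map (fun pq => canonB pq.1 pq.2)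

-- invariant tying A's running state to B's trajectory prefix
def StInv (a : Int × Int × Int × List (Int × Int × Int × Int))
    (path : List (Int × Int)) : Prop :=
  path ≠ [] ∧ path.getLast?.getD (0, 0) = (a.1, a.2.1) ∧
  (-5 ≤ a.1 ∧ a.1 ≤ 5 ∧ -5 ≤ a.2.1 ∧ a.2.1 ≤ 5) ∧
  a.2.2.1 = ((PySem.Set.ofList (edgesOf path)).length : Int) ∧
  ∀ p q : Int × Int, (p.1, p.2, q.1, q.2) ∈ a.2.2.2 ↔ canonB p q ∈ PySem.Set.ofList (edgesOf path)

theorem canon_comm (p q : Int × Int) : canonB p q = canonB q p := by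
  obtain ⟨a, b⟩ := p; obtain ⟨c, d⟩ := q
  simp only [canonB]
  split_ifs with h1 h2 h2 <;> simp_all [Prod.ext_iff] <;> omega

theorem canon_cases (p q r s : Int × Int) (h : canonB p q = canonB r s) :
    (p = r ∧ q = s) ∨ (p = s ∧ q = r) := by
  simp only [canonB] at h
  split_ifs at h <;> simp only [Prod.mk.injEq] at h <;> tauto

theorem edgesOf_snoc (p : List (Int × Int)) (hp : p ≠ []) (q : Int × Int) :
    edgesOf (p ++ [q]) = edgesOf p ++ [canonB (p.getLast?.getD (0, 0)) q] := by
  induction p with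
  | nil => exact absurd rfl hp
  | cons a t ih =>
    cases t with
    | nil => simp [edgesOf]
    | cons b t' =>
      have h2 : edgesOf ((a :: b :: t') ++ [q]) = canonB a b :: edgesOf ((b :: t') ++ [q]) := by
        simp [edgesOf]
      have h1 : edgesOf (a :: b :: t') = canonB a b :: edgesOf (b :: t') := by
        simp [edgesOf]
      rw [h2, ih (by simp), h1]
      simp

-- under the position-in-bounds invariant, A's branch chain computes exactly
-- B's table move filtered by the both-coordinate bounds test
theorem mv_eq (c : Char) (x y : Int) (hx1 : -5 ≤ x) (hx2 : x ≤ 5) (hy1 : -5 ≤ y) (hy2 : y ≤ 5) :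
    (if c = 'U' ∧ y + 1 ≤ 5 then some (x, y + 1)
     else if c = 'D' ∧ y - 1 ≥ -5 then some (x, y - 1)
     else if c = 'R' ∧ x + 1 ≤ 5 then some (x + 1, y)
     else if c = 'L' ∧ x - 1 ≥ -5 then some (x - 1, y)
     else none)
    = (match moveDelta c with
       | none => none
       | some (dx, dy) =>
         if -5 ≤ x + dx ∧ x + dx ≤ 5 ∧ -5 ≤ y + dy ∧ y + dy ≤ 5
         then some (x + dx, y + dy) else none) := by
  by_cases hU : c = 'U'
  · subst hU; simp only [moveDelta, reduceIte]
    split_ifs <;> simp_all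
    all_goals omega
  · by_cases hD : c = 'D'
    · subst hD; simp only [moveDelta]
      norm_num
      split_ifs <;> simp_all
      all_goals omega
    · by_cases hR : c = 'R'
      · subst hR; simp only [moveDelta]
        norm_num
        split_ifs <;> simp_all
        all_goals omega
      · by_cases hL : c = 'L'
        · subst hL; simp only [moveDelta]
          norm_num
          split_ifs <;> simp_all
          all_goals omega
        · simp only [moveDelta, hU, hD, hR, hL, if_false]
          rw [if_neg (by tauto), if_neg (by tauto), if_neg (by tauto), if_neg (by tauto)]

theorem step_core (x y nx ny ans : Int) (road : List (Int × Int × Int × Int))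
    (path : List (Int × Int)) (hp : path ≠ [])
    (hlast : path.getLast?.getD (0, 0) = (x, y))
    (hb : -5 ≤ nx ∧ nx ≤ 5 ∧ -5 ≤ ny ∧ ny ≤ 5)
    (hlen : ans = ((PySem.Set.ofList (edgesOf path)).length : Int))
    (hmem : ∀ p q : Int × Int, (p.1, p.2, q.1, q.2) ∈ road ↔ canonB p q ∈ PySem.Set.ofList (edgesOf path)) :
    StInv (if (x, y, nx, ny) ∈ road then (nx, ny, ans, road)
           else (nx, ny, ans + 1, road ++ [(x, y, nx, ny), (nx, ny, x, y)]))
          (path ++ [(nx, ny)]) := by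
  have hedg : edgesOf (path ++ [(nx, ny)]) = edgesOf path ++ [canonB (x, y) (nx, ny)] := by
    rw [edgesOf_snoc path hp, hlast]
  have hofl : PySem.Set.ofList (edgesOf (path ++ [(nx, ny)]))
      = PySem.Set.add (PySem.Set.ofList (edgesOf path)) (canonB (x, y) (nx, ny)) := by
    rw [hedg, PySem.Set.ofList_append_singleton]
  have hlast2 : (path ++ [(nx, ny)]).getLast?.getD (0, 0) = (nx, ny) := by simp
  by_cases hm : (x, y, nx, ny) ∈ road
  · have he : canonB (x, y) (nx, ny) ∈ PySem.Set.ofList (edgesOf path) :=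
      (hmem (x, y) (nx, ny)).1 hm
    rw [if_pos hm]
    refine ⟨by simp, hlast2, hb, ?_, ?_⟩
    · rw [hofl, PySem.Set.add_of_mem he]; exact hlen
    · intro p q; rw [hofl, PySem.Set.add_of_mem he]; exact hmem p q
  · have he : canonB (x, y) (nx, ny) ∉ PySem.Set.ofList (edgesOf path) :=
      fun h => hm ((hmem (x, y) (nx, ny)).2 h)
    rw [if_neg hm]
    refine ⟨by simp, hlast2, hb, ?_, ?_⟩
    · rw [hofl, PySem.Set.add_of_not_mem he]; simp [hlen]
    · intro p q
      rw [hofl, PySem.Set.add_of_not_mem he]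
      have hkey : ((p.1, p.2, q.1, q.2) = (x, y, nx, ny) ∨ (p.1, p.2, q.1, q.2) = (nx, ny, x, y))
          ↔ canonB p q = canonB (x, y) (nx, ny) := by
        constructor
        · rintro (h | h)
          · obtain ⟨p1, p2⟩ := p; obtain ⟨q1, q2⟩ := q
            simp only [Prod.mk.injEq] at h
            obtain ⟨h1, h2, h3, h4⟩ := h; subst h1; subst h2; subst h3; subst h4; rfl
          · obtain ⟨p1, p2⟩ := p; obtain ⟨q1, q2⟩ := q
            simp only [Prod.mk.injEq] at h
            obtain ⟨h1, h2, h3, h4⟩ := h; subst h1; subst h2; subst h3; subst h4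
            exact canon_comm _ _
        · intro h
          rcases canon_cases p q (x, y) (nx, ny) h with ⟨hp2, hq⟩ | ⟨hp2, hq⟩
          · left; rw [hp2, hq]
          · right; rw [hp2, hq]
      simp only [List.mem_append, List.mem_cons, List.not_mem_nil, or_false]
      rw [hmem p q, hkey]

theorem inv_step (a : Int × Int × Int × List (Int × Int × Int × Int))
    (path : List (Int × Int)) (c : Char)
    (h : StInv a path) : StInv (stepA a c) (stepPath path c) := by
  obtain ⟨x, y, ans, road⟩ := a
  obtain ⟨hp, hlast, hbnd, hlen, hmem⟩ := h
  simp only at hlast hbnd hlen hmem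
  obtain ⟨hx1, hx2, hy1, hy2⟩ := hbnd
  simp only [stepA, stepPath, hlast]
  rw [mv_eq c x y hx1 hx2 hy1 hy2]
  cases hmv : moveDelta c with
  | none => exact ⟨hp, hlast, ⟨hx1, hx2, hy1, hy2⟩, hlen, hmem⟩
  | some d =>
    obtain ⟨dx, dy⟩ := d
    dsimp only
    by_cases hb : -5 ≤ x + dx ∧ x + dx ≤ 5 ∧ -5 ≤ y + dy ∧ y + dy ≤ 5
    · rw [if_pos hb, if_pos hb]
      exact step_core x y (x + dx) (y + dy) ans road path hp hlast hb hlen hmem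
    · rw [if_neg hb, if_neg hb]
      exact ⟨hp, hlast, ⟨hx1, hx2, hy1, hy2⟩, hlen, hmem⟩

theorem inv_foldl (l : List Char) (a : Int × Int × Int × List (Int × Int × Int × Int))
    (path : List (Int × Int)) (h : StInv a path) :
    StInv (l.foldl stepA a) (l.foldl stepPath path) := by
  induction l generalizing a path with
  | nil => exact h
  | cons c l ih => exact ih _ _ (inv_step a path c h)

-- ===== VERDICT (by name: the statement is the Claim_ definition above) =====
theorem solution_spec : Claim_equal_solution := by
  intro dirs _
  unfold Spec_solution solution solution_alt
  have h0 : StInv (0, 0, 0, ([] : List (Int × Int × Int × Int))) [(0, 0)] := by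
    refine ⟨by simp, by simp, by norm_num, by simp [edgesOf, PySem.Set.ofList], ?_⟩
    intro p q; simp [edgesOf, PySem.Set.ofList]
  exact (inv_foldl dirs.toList _ _ h0).2.2.2.1
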